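-- pv_equiv track=rewrite | github.com/sermolaev1986/advent-of-code-2024 | 14_2.py | is_xmas_tree
-- ===== SOURCE A (Python) =====
-- def is_xmas_tree(grid):
--     previous = 0
--     for row in grid:
--         count = 0
--         for char in row:
--             if char != '.':
--                 count += 1
--         if count < previous:
--             return False
--         else:
--             previous = count
--
--     return True
-- ===== SOURCE B (Python) =====
-- def is_xmas_tree(grid):
--     counts = [sum(1 for char in row if char != '.') for row in grid]
--     return counts == sorted(counts)
-- ===== Notes on version B (the rewrite author's own statement) =====
-- stated objective: idiomatic
-- what changed: Replaces the fused loop with early-exit pairwise comparison by building the per-row non-dot count table once and checking monotonicity as counts == sorted(counts).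
import Mathlib
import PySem

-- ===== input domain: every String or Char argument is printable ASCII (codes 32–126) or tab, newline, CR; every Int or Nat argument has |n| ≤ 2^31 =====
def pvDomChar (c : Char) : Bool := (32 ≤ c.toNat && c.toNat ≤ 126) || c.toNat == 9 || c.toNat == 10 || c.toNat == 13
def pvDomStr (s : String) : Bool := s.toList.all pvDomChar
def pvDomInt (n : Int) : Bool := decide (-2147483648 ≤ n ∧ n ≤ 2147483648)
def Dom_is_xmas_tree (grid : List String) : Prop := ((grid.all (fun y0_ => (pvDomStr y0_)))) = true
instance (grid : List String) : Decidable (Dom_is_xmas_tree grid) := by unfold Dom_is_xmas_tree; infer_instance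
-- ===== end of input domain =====

-- B builds the per-row non-dot count table once and checks monotonicity via counts == sorted(counts),
-- replacing A's fused loop with early-exit pairwise comparison (objective: idiomatic decomposition).

-- ===== PORT A =====
-- inner loop of A: count = 0; for char in row: if char != '.': count += 1
def aCount (row : List Char) : Nat :=
  row.foldl (fun count char => if char ≠ '.' then count + 1 else count) 0

-- outer loop of A with the 'previous' accumulator; 'return False' = early exit
def aLoop (grid : List String) (previous : Nat) : Bool :=
  match grid with
  | [] => true
  | row :: rest =>
    let count := aCount row.toList
    if count < previous then false else aLoop rest count

def is_xmas_tree (grid : List String) : Bool := aLoop grid 0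

-- ===== PORT B =====
-- sum(1 for char in row if char != '.')
def bCount (row : List Char) : Nat := row.countP (fun char => char ≠ '.')

def is_xmas_tree_alt (grid : List String) : Bool :=
  let counts := grid.map (fun row => bCount row.toList)
  decide (counts = PySem.List.sorted counts (fun x => x) false)

-- ===== PRECONDITION & SPEC =====
def Spec_is_xmas_tree (grid : List String) (out : Bool) : Prop := out = is_xmas_tree_alt grid
instance (grid : List String) (out : Bool) : Decidable (Spec_is_xmas_tree grid out) := by unfold Spec_is_xmas_tree; infer_instance

-- ===== CLAIM (what is proved, stated in full; the proofs are below) =====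
def Claim_equal_is_xmas_tree : Prop := ∀ (grid : List String), Dom_is_xmas_tree grid → Spec_is_xmas_tree grid (is_xmas_tree grid)

-- ===== LEMMAS AND PROOFS =====
theorem aCount_eq_bCount (row : List Char) : aCount row = bCount row := by
  suffices h : ∀ (l : List Char) (n : Nat),
      l.foldl (fun count char => if char ≠ '.' then count + 1 else count) n = n + l.countP (fun char => char ≠ '.') by
    simpa [aCount, bCount] using h row 0
  intro l
  induction l with
  | nil => simp
  | cons c t ih =>
    intro n
    rw [List.foldl_cons, List.countP_cons, ih]
    by_cases hc : c = '.' <;> simp [hc] <;> omega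

theorem aLoop_true_iff (grid : List String) (prev : Nat) :
    aLoop grid prev = true ↔ List.Pairwise (· ≤ ·) (prev :: grid.map (fun row => bCount row.toList)) := by
  induction grid generalizing prev with
  | nil => simp [aLoop]
  | cons row rest ih =>
    simp only [aLoop, aCount_eq_bCount, List.map_cons]
    set c := bCount row.toList with hc
    constructor
    · intro h
      by_cases hlt : c < prev
      · simp [hlt] at h
      · rw [if_neg hlt] at h
        have hp := (ih c).mp h
        refine List.pairwise_cons.mpr ⟨?_, hp⟩
        intro x hx
        rcases List.mem_cons.mp hx with rfl | hx
        · omega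
        · have : c ≤ x := List.rel_of_pairwise_cons hp hx
          omega
    · intro h
      have h1 : prev ≤ c := List.rel_of_pairwise_cons h (List.mem_cons_self ..)
      rw [if_neg (by omega)]
      exact (ih c).mpr (List.Pairwise.of_cons h)

theorem pairwise_iff_sorted_eq (l : List Nat) :
    l.Pairwise (· ≤ ·) ↔ l = PySem.List.sorted l (fun x => x) false := by
  constructor
  · intro h
    exact (PySem.List.sorted_eq_self_of_pairwise l (fun x => x) (by simpa using h)).symm
  · intro h
    have hs := PySem.List.sorted_pairwise (xs := l) (key := fun (x : Nat) => x)
    rw [← h] at hs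
    simpa using hs

-- ===== VERDICT (by name: the statement is the Claim_ definition above) =====
theorem is_xmas_tree_spec : Claim_equal_is_xmas_tree := by
  intro grid _
  unfold Spec_is_xmas_tree is_xmas_tree is_xmas_tree_alt
  rw [Bool.eq_iff_iff, aLoop_true_iff, decide_eq_true_iff, ← pairwise_iff_sorted_eq]
  generalize (grid.map (fun row => bCount row.toList)) = counts
  cases counts with
  | nil => simp
  | cons c t =>
    constructor
    · exact List.Pairwise.of_cons
    · intro h
      refine List.pairwise_cons.mpr ⟨?_, h⟩
      intro x hx
      exact Nat.zero_le x
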